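-- pv_equiv track=rewrite | github.com/TheWoxPL/pp1 | 13-Test3/p1.py | f
-- ===== SOURCE A (Python) =====
-- def f(n):
--     str=""
--     if n>=0:
--         for i in range(n):
--             if i%5==0  and i>0:
--                 str+="-"
--             str+="/"
--
--     return str
-- ===== SOURCE B (Python) =====
-- def f(n):
--     return "-".join("/" * min(5, n - i) for i in range(0, n, 5))
-- ===== Notes on version B (the rewrite author's own statement) =====
-- stated objective: simpler
-- what changed: Replaces A's per-character loop with its modulo dash test and one-character string appends by chunk arithmetic: B builds each run of up to five slashes directly from range(0, n, 5) and joins the runs with dashes in a single join expression.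
import Mathlib
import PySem

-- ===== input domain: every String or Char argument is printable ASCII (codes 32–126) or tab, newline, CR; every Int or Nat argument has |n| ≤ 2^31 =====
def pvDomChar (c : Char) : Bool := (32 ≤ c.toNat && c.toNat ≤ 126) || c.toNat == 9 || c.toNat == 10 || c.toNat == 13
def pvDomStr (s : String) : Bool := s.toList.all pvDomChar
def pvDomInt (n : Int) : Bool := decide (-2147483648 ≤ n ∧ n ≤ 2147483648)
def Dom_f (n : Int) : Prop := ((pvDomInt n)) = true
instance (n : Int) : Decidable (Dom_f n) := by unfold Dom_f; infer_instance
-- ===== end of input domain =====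

-- B replaces the per-character loop with a modulo test by chunk arithmetic: runs of up to
-- five slashes from range(0, n, 5), joined with dashes (objective: simpler).
-- '/'-runs built from range(0, n, 5) and joined with '-' (objective: simpler).

-- ===== PORT A =====
def f (n : Int) : String :=
  let str := ""
  if n ≥ 0 then
    (PySem.List.pyRange 0 n 1).foldl
      (fun str i =>
        (if PySem.Int.mod i 5 == 0 && decide (0 < i) then str ++ "-" else str) ++ "/")
      str
  else str

-- ===== PORT B =====
def f_alt (n : Int) : String :=
  PySem.Str.join "-"
    ((PySem.List.pyRange 0 n 5).map
      (fun i => String.ofList (PySem.List.pyRepeat ['/'] (min 5 (n - i)))))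

-- ===== PRECONDITION & SPEC =====
def Spec_f (n : Int) (out : String) : Prop := out = f_alt n
instance (n : Int) (out : String) : Decidable (Spec_f n out) := by unfold Spec_f; infer_instance

-- ===== CLAIM (what is proved, stated in full; the proofs are below) =====
def Claim_equal_f : Prop := ∀ (n : Int), Dom_f n → Spec_f n (f n)

-- ===== LEMMAS AND PROOFS =====

-- the character sequence A builds after m iterations
def repA : Nat → List Char
  | 0 => []
  | m+1 => repA m ++ (if m % 5 = 0 ∧ 0 < m then ['-', '/'] else ['/'])

-- B's list of groups, at character level
def grpL (n : Int) : List (List Char) :=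
  (PySem.List.pyRange 0 n 5).map (fun i => List.replicate (min 5 (n - i)).toNat '/')

-- A's fold, moved to char lists
lemma foldA_toList (l : List Int) (s : String) :
    (l.foldl
      (fun str i =>
        (if PySem.Int.mod i 5 == 0 && decide (0 < i) then str ++ "-" else str) ++ "/") s).toList
  = l.foldl
      (fun cs i =>
        (if PySem.Int.mod i 5 == 0 && decide (0 < i) then cs ++ ['-'] else cs) ++ ['/']) s.toList := by
  induction l generalizing s with
  | nil => rfl
  | cons x xs ih =>
      simp only [List.foldl_cons, ih]
      congr 1
      split <;> simp

lemma foldA_range (m : Nat) (cs : List Char) :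
    ((List.range m).map (fun k => Int.ofNat k)).foldl
      (fun cs i =>
        (if PySem.Int.mod i 5 == 0 && decide (0 < i) then cs ++ ['-'] else cs) ++ ['/']) cs
  = cs ++ repA m := by
  induction m generalizing cs with
  | zero => simp [repA]
  | succ m ih =>
      rw [List.range_succ, List.map_append, List.foldl_append, ih]
      simp only [List.map_cons, List.map_nil, List.foldl_cons, List.foldl_nil, repA]
      have hcond : (PySem.Int.mod (Int.ofNat m) 5 == 0 && decide ((0:Int) < Int.ofNat m))
          = decide (m % 5 = 0 ∧ 0 < m) := by
        rw [show ((5:Int) = ((5:Nat):Int)) by norm_num, show Int.ofNat m = ((m:Nat):Int) from rfl,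
            PySem.Int.mod_natCast]
        by_cases h1 : m % 5 = 0 <;> by_cases h2 : 0 < m <;>
          simp [h1, h2, Int.natCast_pos] <;> omega
      rw [hcond]
      by_cases h : m % 5 = 0 ∧ 0 < m <;> simp [h]

lemma f_toList (n : Int) (hn : 0 ≤ n) : (f n).toList = repA n.toNat := by
  unfold f
  rw [if_pos hn, foldA_toList, PySem.List.pyRange_one]
  have he : (fun k : Nat => (0:Int) + (k:Int)) = (fun k : Nat => Int.ofNat k) := by
    funext k; simp [Int.ofNat_eq_natCast]
  rw [sub_zero, he]
  simpa using foldA_range n.toNat []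

-- front decomposition of repA: five slashes, a dash, then the pattern shifted by 5
lemma repA_shift (m : Nat) (h : 1 ≤ m) :
    repA (m + 5) = List.replicate 5 '/' ++ '-' :: repA m := by
  induction m with
  | zero => omega
  | succ m ih =>
      by_cases hm : 1 ≤ m
      · have step : ∀ k : Nat, repA (k + 1)
            = repA k ++ (if k % 5 = 0 ∧ 0 < k then ['-', '/'] else ['/']) := fun _ => rfl
        have e1 : m + 1 + 5 = (m + 5) + 1 := by omega
        rw [e1, step, ih hm, step]
        have h5 : ((m + 5) % 5 = 0 ∧ 0 < m + 5) ↔ (m % 5 = 0 ∧ 0 < m) := by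
          constructor <;> (rintro ⟨a, b⟩; exact ⟨by omega, by omega⟩)
        simp only [h5]
        simp
      · have hz : m = 0 := by omega
        subst hz
        decide

-- B's groups: pulled apart at the front
lemma grpL_shift (m : Nat) (h : 1 ≤ m) :
    grpL ((m : Int) + 5) = List.replicate 5 '/' :: grpL (m : Int) := by
  unfold grpL
  rw [PySem.List.pyRange_of_pos _ _ (by norm_num), PySem.List.pyRange_of_pos _ _ (by norm_num)]
  have hb1 : (0:Int) < (m:Int) + 5 := by positivity
  have hb2 : (0:Int) < (m:Int) := by exact_mod_cast h
  rw [if_pos hb1, if_pos hb2]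
  have hc : (((m:Int) + 5 - 0 + 5 - 1) / 5).toNat = (((m:Int) - 0 + 5 - 1) / 5).toNat + 1 := by
    omega
  rw [hc, List.range_succ_eq_map]
  simp only [List.map_cons, List.map_map]
  congr 1
  · have hm5 : min 5 ((m:Int) + 5 - (0 + 5 * ((0:Nat):Int))) = 5 := by push_cast; omega
    rw [hm5]
    rfl
  · apply List.map_congr_left
    intro k _
    simp only [Function.comp]
    congr 1
    push_cast
    omega

lemma grpL_ne_nil (m : Nat) (h : 1 ≤ m) : grpL (m : Int) ≠ [] := by
  unfold grpL
  rw [PySem.List.pyRange_of_pos _ _ (by norm_num)]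
  have hb : (0:Int) < (m:Int) := by exact_mod_cast h
  rw [if_pos hb]
  simp only [ne_eq, List.map_eq_nil_iff, List.range_eq_nil]
  omega

-- main B-side lemma: the joined groups equal A's character sequence
lemma join_grpL (m : Nat) (h : 1 ≤ m) :
    PySem.Chars.join ['-'] (grpL (m : Int)) = repA m := by
  induction m using Nat.strong_induction_on with
  | _ m ih =>
      by_cases hs : m ≤ 5
      · interval_cases m <;> decide
      · have h1 : 1 ≤ m - 5 := by omega
        have e : (m : Int) = ((m - 5 : Nat) : Int) + 5 := by omega
        rw [e, grpL_shift _ h1]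
        obtain ⟨q, rest, hq⟩ := List.exists_cons_of_ne_nil (grpL_ne_nil _ h1)
        rw [hq, PySem.Chars.join_cons_cons, ← hq, ih (m - 5) (by omega) h1]
        have hr : repA m = List.replicate 5 '/' ++ '-' :: repA (m - 5) := by
          have := repA_shift (m - 5) h1
          rwa [show m - 5 + 5 = m from by omega] at this
        rw [hr]
        simp

lemma f_alt_toList (n : Int) : (f_alt n).toList = PySem.Chars.join ['-'] (grpL n) := by
  unfold f_alt grpL
  rw [PySem.Str.toList_join, List.map_map]
  congr 1
  apply List.map_congr_left
  intro i _
  simp only [Function.comp_apply, String.toList_ofList, PySem.List.pyRepeat_singleton]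

lemma pyRange_empty_of_nonpos (n : Int) (h : n ≤ 0) : PySem.List.pyRange 0 n 5 = [] := by
  rw [PySem.List.pyRange_of_pos _ _ (by norm_num)]
  have hlt : ¬ (0:Int) < n := by omega
  simp [hlt]

-- ===== VERDICT (by name: the statement is the Claim_ definition above) =====
theorem f_spec : Claim_equal_f := by
  intro n _
  unfold Spec_f
  by_cases hn : 0 ≤ n
  · by_cases h0 : n = 0
    · subst h0; decide
    · apply String.toList_inj.mp
      rw [f_toList n hn, f_alt_toList]
      have h1 : 1 ≤ n.toNat := by omega
      have hcast : ((n.toNat : Int)) = n := by omega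
      have hj := join_grpL n.toNat h1
      rw [hcast] at hj
      exact hj.symm
  · have hA : f n = "" := by unfold f; rw [if_neg hn]
    have hB : f_alt n = "" := by
      apply String.toList_inj.mp
      rw [f_alt_toList]
      unfold grpL
      rw [pyRange_empty_of_nonpos n (by omega)]
      rfl
    rw [hA, hB]
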